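-- pv_equiv track=rewrite | github.com/GopalSaraf/learnML | learnML/preprocessing/one_hot_encoding.py | _get_encoding_string
-- ===== SOURCE A (Python) =====
-- def _get_encoding_string(num: int, num_bits: int) -> str:
--     """
--     ### Get the binary encoding string for a number
--
--     Parameters
--     ----------
--
--     `num` : int
--     - The number to encode
--
--     `num_bits` : int
--     - The number of bits to use for the encoding
--
--
--     Returns
--     -------
--
--     `str`
--     - The binary encoding string for the number
--
--     ---
--     """
--     encoding_string = ""
--     for i in range(num_bits):
--         if i == num:
--             encoding_string += "1"
--         else:
--             encoding_string += "0"
--     return encoding_string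
-- ===== SOURCE B (Python) =====
-- def _get_encoding_string(num: int, num_bits: int) -> str:
--     if 0 <= num < num_bits:
--         return "0" * num + "1" + "0" * (num_bits - num - 1)
--     return "0" * num_bits
-- ===== Notes on version B (the rewrite author's own statement) =====
-- stated objective: simpler
-- what changed: Replaces the per-position loop with string repetition: one bounds check and three constant-count repetitions instead of num_bits iterations with per-index comparison.
import Mathlib
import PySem

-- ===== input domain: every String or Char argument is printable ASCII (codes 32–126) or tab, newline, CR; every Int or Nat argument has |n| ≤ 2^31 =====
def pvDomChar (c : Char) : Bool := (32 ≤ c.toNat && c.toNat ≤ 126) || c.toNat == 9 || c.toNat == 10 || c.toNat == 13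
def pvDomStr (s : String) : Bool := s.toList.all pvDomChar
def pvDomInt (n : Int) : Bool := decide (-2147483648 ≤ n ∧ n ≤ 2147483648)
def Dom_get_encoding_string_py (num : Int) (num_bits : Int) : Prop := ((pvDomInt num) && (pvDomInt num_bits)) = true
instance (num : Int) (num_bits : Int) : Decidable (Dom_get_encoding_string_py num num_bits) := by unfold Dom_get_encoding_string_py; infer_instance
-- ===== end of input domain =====

-- B replaces A's per-position loop by a bounds check and three string repetitions (simpler; same value everywhere).

-- ===== PORT A =====
-- literal port: for i in range(num_bits): encoding_string += "1" if i == num else "0"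
def get_encoding_string_py (num : Int) (num_bits : Int) : String :=
  (PySem.List.pyRange 0 num_bits 1).foldl
    (fun encoding_string i => encoding_string ++ (if i = num then "1" else "0")) ""

-- ===== PORT B =====
-- "0" * k  ==  String.ofList (List.replicate k.toNat '0')  (Python repetition with a
-- non-positive count is the empty string, matching Int.toNat's clamping)
def get_encoding_string_py_alt (num : Int) (num_bits : Int) : String :=
  if 0 ≤ num ∧ num < num_bits then
    String.ofList (List.replicate num.toNat '0') ++ "1" ++
      String.ofList (List.replicate (num_bits - num - 1).toNat '0')
  else
    String.ofList (List.replicate num_bits.toNat '0')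

-- ===== PRECONDITION & SPEC =====
def Spec_get_encoding_string_py (num : Int) (num_bits : Int) (out : String) : Prop := out = get_encoding_string_py_alt num num_bits
instance (num : Int) (num_bits : Int) (out : String) : Decidable (Spec_get_encoding_string_py num num_bits out) := by unfold Spec_get_encoding_string_py; infer_instance

-- ===== CLAIM (what is proved, stated in full; the proofs are below) =====
def Claim_equal_get_encoding_string_py : Prop := ∀ (num : Int) (num_bits : Int), Dom_get_encoding_string_py num num_bits → Spec_get_encoding_string_py num num_bits (get_encoding_string_py num num_bits)

-- ===== LEMMAS AND PROOFS =====

-- the character list both ports spell out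
def pvOneHot (num : Int) (n : Nat) : List Char :=
  if 0 ≤ num ∧ num < (n : Int) then
    List.replicate num.toNat '0' ++ '1' :: List.replicate ((n : Int) - num - 1).toNat '0'
  else
    List.replicate n '0'

theorem foldl_append_bits (num : Int) (l : List Int) (init : String) :
    (l.foldl (fun s i => s ++ (if i = num then "1" else "0")) init).toList
      = init.toList ++ l.map (fun i => if i = num then '1' else '0') := by
  induction l generalizing init with
  | nil => simp
  | cons a t ih =>
      simp only [List.foldl_cons, List.map_cons, ih]
      by_cases h : a = num <;> simp [h]

theorem range_map_eq_oneHot (num : Int) (n : Nat) :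
    List.map (fun k : Nat => if (k : Int) = num then '1' else '0') (List.range n) = pvOneHot num n := by
  induction n with
  | zero => simp [pvOneHot]
  | succ n ih =>
      rw [List.range_succ, List.map_append, ih]
      simp only [List.map_cons, List.map_nil]
      unfold pvOneHot
      by_cases h1 : 0 ≤ num ∧ num < (n : Int)
      · have ht : (((n + 1 : Nat) : Int) - num - 1).toNat = ((n : Int) - num - 1).toNat + 1 := by
          push_cast; omega
        rw [if_pos h1, if_neg (show ¬ ((n : Int) = num) by omega),
          if_pos (show 0 ≤ num ∧ num < ((n + 1 : Nat) : Int) by push_cast; omega), ht,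
          List.replicate_succ']
        simp
      · by_cases h2 : num = (n : Int)
        · have hz : (((n + 1 : Nat) : Int) - num - 1).toNat = 0 := by push_cast; omega
          rw [if_neg h1, if_pos h2.symm,
            if_pos (show 0 ≤ num ∧ num < ((n + 1 : Nat) : Int) by push_cast; omega), hz,
            show num.toNat = n by omega]
          simp
        · rw [if_neg h1, if_neg (show ¬ ((n : Int) = num) by omega),
            if_neg (show ¬ (0 ≤ num ∧ num < ((n + 1 : Nat) : Int)) by push_cast; omega),
            List.replicate_succ']

theorem portA_toList (num : Int) (num_bits : Int) :
    (get_encoding_string_py num num_bits).toList = pvOneHot num num_bits.toNat := by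
  unfold get_encoding_string_py
  rw [PySem.List.pyRange_one, foldl_append_bits]
  simpa [List.map_map, Function.comp_def] using range_map_eq_oneHot num num_bits.toNat

theorem portB_toList (num : Int) (num_bits : Int) :
    (get_encoding_string_py_alt num num_bits).toList = pvOneHot num num_bits.toNat := by
  unfold get_encoding_string_py_alt pvOneHot
  by_cases h : 0 ≤ num ∧ num < num_bits
  · have h' : 0 ≤ num ∧ num < (num_bits.toNat : Int) := by omega
    have ht : ((num_bits.toNat : Int) - num - 1).toNat = (num_bits - num - 1).toNat := by omega
    rw [if_pos h, if_pos h', ht]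
    simp
  · have h' : ¬ (0 ≤ num ∧ num < (num_bits.toNat : Int)) := by omega
    rw [if_neg h, if_neg h']
    simp

-- ===== VERDICT (by name: the statement is the Claim_ definition above) =====
theorem get_encoding_string_py_spec : Claim_equal_get_encoding_string_py := by
  intro num num_bits _
  unfold Spec_get_encoding_string_py
  apply String.toList_inj.mp
  rw [portA_toList, portB_toList]
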